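-- pv_equiv track=rewrite | github.com/Bar-Maz/advent-of-code-2020 | Day 06/day6.py | part1
-- ===== SOURCE A (Python) =====
-- def part1(lines):
--     answers_set = set({})
--     answers_sum = 0
--     for line in lines:
--         if line:
--             # if we convert a string to a set, we get a set with all letters in a string
--             # example: set("banana") -> {'b', 'a', 'n'}
--             # set1 | set2 returns union of two sets: answers given in either line
--             # {'b', 'a', 'n'} | {'n', 'o', 't'} -> {'b', 'a', 'n', 'o', 't'}
--             answers_set |= set(line)
--         else:
--             # empty line == end of the group, we count how many answers did we get and add these to our sum
--             answers_sum += len(answers_set)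
--             answers_set = set({})
--     # no empty line at the end of the input
--     answers_sum += len(answers_set)
--     return answers_sum
-- ===== SOURCE B (Python) =====
-- def part1(lines):
--     # Group-wise: cut the list at each empty line, count distinct letters of the
--     # joined group, accumulate.  Same value as A's per-line set-union fold.
--     total = 0
--     rest = lines
--     while "" in rest:
--         i = rest.index("")
--         total += len(set("".join(rest[:i])))
--         rest = rest[i + 1:]
--     return total + len(set("".join(rest)))
-- ===== Notes on version B (the rewrite author's own statement) =====
-- stated objective: simpler
-- what changed: Instead of a per-line fold that maintains a running answer set and resets it on blank lines, B cuts the list at each empty line with index/slice and counts len(set(''.join(group))) per group.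
import Mathlib
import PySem

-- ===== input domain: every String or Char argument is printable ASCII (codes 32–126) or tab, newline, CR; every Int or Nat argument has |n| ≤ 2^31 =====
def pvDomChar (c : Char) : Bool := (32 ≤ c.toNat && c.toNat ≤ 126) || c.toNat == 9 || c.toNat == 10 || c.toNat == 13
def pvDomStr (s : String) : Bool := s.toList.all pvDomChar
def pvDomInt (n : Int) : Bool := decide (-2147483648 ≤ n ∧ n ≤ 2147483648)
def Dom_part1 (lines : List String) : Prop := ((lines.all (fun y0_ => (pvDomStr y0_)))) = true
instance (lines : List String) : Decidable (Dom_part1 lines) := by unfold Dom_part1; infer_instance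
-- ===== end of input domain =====

-- B replaces A's per-line set-union fold (reset on blank lines) by cutting the list at each
-- empty line and counting the distinct letters of each joined group; simpler, same values.

-- ===== PORT A =====
-- A's loop body: answers_set |= set(line) = Set.union · (Set.ofList line.toList);
-- len = Set.len; truthiness 'if line:' = line ≠ "".
def stepA (st : PySem.Set Char × Int) (line : String) : PySem.Set Char × Int :=
  if line ≠ "" then (PySem.Set.union st.1 (PySem.Set.ofList line.toList), st.2)
  else (PySem.Set.empty, st.2 + PySem.Set.len st.1)

def part1 (lines : List String) : Int :=
  let r := lines.foldl stepA (PySem.Set.empty, 0)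
  r.2 + PySem.Set.len r.1

-- ===== PORT B =====
-- ''.join(xs) is concatenation: (xs.map String.toList).flatten (exact: empty separator);
-- rest[:i] with 0 ≤ i = take i (PySem.List.slice_to_natCast); rest[i+1:] = drop (i+1);
-- '"" in rest' then 'rest.index("")' = one 'match' on PySem.List.index? rest "".
-- The while loop over the shrinking 'rest' is this tail recursion.
def part1Go (total : Int) (rest : List String) : Int :=
  match h : PySem.List.index? rest "" with
  | some i =>
      part1Go (total + PySem.Set.len (PySem.Set.ofList (((rest.take i).map String.toList).flatten)))
        (rest.drop (i + 1))
  | none => total + PySem.Set.len (PySem.Set.ofList ((rest.map String.toList).flatten))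
termination_by rest.length
decreasing_by
  obtain ⟨hk, -, -⟩ := PySem.List.getElem_of_index?_eq_some h
  simp only [List.length_drop]; omega

def part1_alt (lines : List String) : Int := part1Go 0 lines

-- ===== PRECONDITION & SPEC =====
def Spec_part1 (lines : List String) (out : Int) : Prop := out = part1_alt lines
instance (lines : List String) (out : Int) : Decidable (Spec_part1 lines out) := by unfold Spec_part1; infer_instance

-- ===== CLAIM (what is proved, stated in full; the proofs are below) =====
def Claim_equal_part1 : Prop := ∀ (lines : List String), Dom_part1 lines → Spec_part1 lines (part1 lines)

-- ===== LEMMAS AND PROOFS =====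

-- part1Go generalized over a carried prefix set s (s = the answers A's loop has
-- accumulated since the last blank line).
def goG (s : PySem.Set Char) (total : Int) (rest : List String) : Int :=
  match PySem.List.index? rest "" with
  | some i =>
      part1Go (total + PySem.Set.len (PySem.Set.update s (((rest.take i).map String.toList).flatten)))
        (rest.drop (i + 1))
  | none => total + PySem.Set.len (PySem.Set.update s ((rest.map String.toList).flatten))

theorem part1Go_eq (total : Int) (rest : List String) :
    part1Go total rest =
      match PySem.List.index? rest "" with
      | some i =>
          part1Go (total + PySem.Set.len (PySem.Set.ofList (((rest.take i).map String.toList).flatten)))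
            (rest.drop (i + 1))
      | none => total + PySem.Set.len (PySem.Set.ofList ((rest.map String.toList).flatten)) := by
  rw [part1Go]
  split <;> rename_i hh <;> simp only [hh]

theorem goG_empty (total : Int) (rest : List String) :
    goG PySem.Set.empty total rest = part1Go total rest := by
  rw [part1Go_eq, goG]
  cases PySem.List.index? rest "" <;> simp [PySem.Set.update_nil_left, PySem.Set.empty]

theorem update_ofList (s : PySem.Set Char) (l : List Char) :
    PySem.Set.update s (PySem.Set.ofList l) = PySem.Set.update s l := by
  rw [PySem.Set.update_eq_append_filter, PySem.Set.update_eq_append_filter, PySem.Set.ofList_ofList]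

theorem goG_cons_empty (s : PySem.Set Char) (total : Int) (rest : List String) :
    goG s total ("" :: rest) = part1Go (total + PySem.Set.len s) rest := by
  rw [goG, PySem.List.index?_cons_self]
  simp [PySem.Set.update_nil]

theorem goG_cons_ne (s : PySem.Set Char) (total : Int) (l : String) (rest : List String)
    (hl : l ≠ "") :
    goG s total (l :: rest) = goG (PySem.Set.update s l.toList) total rest := by
  rw [goG, goG, PySem.List.index?_cons_of_ne _ hl]
  cases hi : PySem.List.index? rest "" with
  | none => simp [PySem.Set.update_append]
  | some i => simp [List.take_succ_cons, PySem.Set.update_append, List.drop_succ_cons]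

theorem foldl_stepA (rest : List String) :
    ∀ (s : PySem.Set Char) (total : Int),
      (rest.foldl stepA (s, total)).2 + PySem.Set.len (rest.foldl stepA (s, total)).1
        = goG s total rest := by
  induction rest with
  | nil =>
      intro s total
      rw [goG]
      simp [PySem.Set.update_nil]
  | cons l rest ih =>
      intro s total
      by_cases hl : l = ""
      · subst hl
        rw [goG_cons_empty, ← goG_empty]
        simpa [List.foldl_cons, stepA] using ih PySem.Set.empty (total + PySem.Set.len s)
      · rw [goG_cons_ne s total l rest hl]
        have hs : stepA (s, total) l = (PySem.Set.update s l.toList, total) := by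
          simp [stepA, hl, PySem.Set.union, update_ofList]
        simpa [List.foldl_cons, hs] using ih (PySem.Set.update s l.toList) total

-- ===== VERDICT (by name: the statement is the Claim_ definition above) =====
theorem part1_spec : Claim_equal_part1 := by
  intro lines _
  show (List.foldl stepA (PySem.Set.empty, 0) lines).2
      + PySem.Set.len (List.foldl stepA (PySem.Set.empty, 0) lines).1 = part1_alt lines
  rw [foldl_stepA lines PySem.Set.empty 0, goG_empty]
  rfl
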